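-- pv_equiv track=rewrite | github.com/Lilol/distribution_system_state_estimation | network/medium_voltage/network.py | dict_of_elements_to_be_checked
-- ===== SOURCE A (Python) =====
-- def dict_of_elements_to_be_checked(list_of_dicts):
--     dict_of_elements = {'buses': [], 'lines': [], 'switches': []}
--     for d in list_of_dicts:
--         if 'buses' in d:
--             dict_of_elements['buses'] += d['buses']
--         if 'lines' in d:
--             dict_of_elements['lines'] += d['lines']
--         if 'switches' in d:
--             dict_of_elements['switches'] += d['switches']
--     return dict_of_elements
-- ===== SOURCE B (Python) =====
-- KEYS = ('buses', 'lines', 'switches')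
--
--
-- def _merge(left, right):
--     # combine two partial results by per-key concatenation (associative)
--     return {k: left[k] + right[k] for k in KEYS}
--
--
-- def dict_of_elements_to_be_checked(list_of_dicts):
--     # Divide and conquer: split the list in half, merge the two partial results.
--     # Correct because per-key concatenation is associative, so any grouping
--     # yields the same left-to-right concatenation order as A's single pass.
--     n = len(list_of_dicts)
--     if n == 0:
--         return {k: [] for k in KEYS}
--     if n == 1:
--         d = list_of_dicts[0]
--         return {k: list(d.get(k, [])) for k in KEYS}
--     mid = n // 2
--     return _merge(dict_of_elements_to_be_checked(list_of_dicts[:mid]),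
--                   dict_of_elements_to_be_checked(list_of_dicts[mid:]))
-- ===== Notes on version B (the rewrite author's own statement) =====
-- stated objective: alternative
-- what changed: Replaces A's single left-to-right pass with a mutated accumulator dict by a divide-and-conquer recursion: split the list of dicts in half, recurse, and merge the two partial results by per-key concatenation (correct since concatenation is associative).
import Mathlib
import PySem

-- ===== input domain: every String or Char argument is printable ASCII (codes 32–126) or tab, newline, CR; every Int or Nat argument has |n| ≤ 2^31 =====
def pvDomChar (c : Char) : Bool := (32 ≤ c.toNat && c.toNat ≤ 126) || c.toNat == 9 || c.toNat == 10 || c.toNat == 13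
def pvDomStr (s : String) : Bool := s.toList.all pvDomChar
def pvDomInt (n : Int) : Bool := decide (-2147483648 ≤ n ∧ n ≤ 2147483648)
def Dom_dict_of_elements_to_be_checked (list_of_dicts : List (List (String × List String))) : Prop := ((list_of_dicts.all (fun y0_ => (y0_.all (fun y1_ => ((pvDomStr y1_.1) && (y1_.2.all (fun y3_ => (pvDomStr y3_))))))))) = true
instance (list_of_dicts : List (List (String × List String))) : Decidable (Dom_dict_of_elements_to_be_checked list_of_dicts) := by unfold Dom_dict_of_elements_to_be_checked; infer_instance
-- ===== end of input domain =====

-- B replaces A's single accumulator pass by a divide-and-conquer recursion (split in half,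
-- merge partial results by per-key concatenation) — an alternative decomposition, not faster.

-- ===== PORT A =====
-- one loop iteration: the three guarded '+=' statements on the accumulator dict
def pvStepA (acc : PySem.Dict String (List String)) (d : List (String × List String)) :
    PySem.Dict String (List String) :=
  let dd := PySem.Dict.mk d
  let acc := if dd.contains "buses" then acc.modify "buses" [] (· ++ dd.getD "buses" []) else acc
  let acc := if dd.contains "lines" then acc.modify "lines" [] (· ++ dd.getD "lines" []) else acc
  if dd.contains "switches" then acc.modify "switches" [] (· ++ dd.getD "switches" []) else acc

def dict_of_elements_to_be_checked (list_of_dicts : List (List (String × List String))) :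
    List (String × List String) :=
  let init : PySem.Dict String (List String) :=
    PySem.Dict.ofList [("buses", []), ("lines", []), ("switches", [])]
  (list_of_dicts.foldl pvStepA init).items

-- ===== PORT B =====
-- d.get(key, [])
def pvGetB (d : List (String × List String)) (key : String) : List String :=
  (PySem.Dict.mk d).getD key []

-- _merge: per-key concatenation of two partial results
def pvMergeB (left right : List (String × List String)) : List (String × List String) :=
  ["buses", "lines", "switches"].map
    (fun k => (k, (PySem.Dict.mk left).getD k [] ++ (PySem.Dict.mk right).getD k []))

def dict_of_elements_to_be_checked_alt (list_of_dicts : List (List (String × List String))) :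
    List (String × List String) :=
  match list_of_dicts with
  | [] => [("buses", []), ("lines", []), ("switches", [])]
  | [d] => ["buses", "lines", "switches"].map (fun k => (k, pvGetB d k))
  | d1 :: d2 :: rest =>
    let l := d1 :: d2 :: rest
    let mid := l.length / 2
    pvMergeB (dict_of_elements_to_be_checked_alt (l.take mid))
             (dict_of_elements_to_be_checked_alt (l.drop mid))
termination_by list_of_dicts.length
decreasing_by
  · simp; omega
  · simp; omega

-- ===== PRECONDITION & SPEC =====
def Spec_dict_of_elements_to_be_checked (list_of_dicts : List (List (String × List String))) (out : List (String × List String)) : Prop := out = dict_of_elements_to_be_checked_alt list_of_dicts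
instance (list_of_dicts : List (List (String × List String))) (out : List (String × List String)) : Decidable (Spec_dict_of_elements_to_be_checked list_of_dicts out) := by unfold Spec_dict_of_elements_to_be_checked; infer_instance

-- ===== CLAIM =====
def Claim_equal_dict_of_elements_to_be_checked : Prop := ∀ (list_of_dicts : List (List (String × List String))), Dom_dict_of_elements_to_be_checked list_of_dicts → Spec_dict_of_elements_to_be_checked list_of_dicts (dict_of_elements_to_be_checked list_of_dicts)

-- ===== LEMMAS AND PROOFS =====

-- the canonical form both sides reach: per-key flatten of the whole list
def pvFlat (l : List (List (String × List String))) : List (String × List String) :=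
  [("buses", l.flatMap (fun d => pvGetB d "buses")),
   ("lines", l.flatMap (fun d => pvGetB d "lines")),
   ("switches", l.flatMap (fun d => pvGetB d "switches"))]

-- A's loop body on a three-key accumulator appends d.get(key, []) at each key
theorem pvStepA_mk (d : List (String × List String)) (bs ls ss : List String) :
    pvStepA (PySem.Dict.mk [("buses", bs), ("lines", ls), ("switches", ss)]) d
      = PySem.Dict.mk [("buses", bs ++ pvGetB d "buses"),
                       ("lines", ls ++ pvGetB d "lines"),
                       ("switches", ss ++ pvGetB d "switches")] := by
  unfold pvStepA pvGetB
  by_cases hb : (PySem.Dict.mk d).contains "buses" <;>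
  by_cases hl : (PySem.Dict.mk d).contains "lines" <;>
  by_cases hs : (PySem.Dict.mk d).contains "switches" <;>
    simp [hb, hl, hs, PySem.Dict.getD_of_not_contains] <;>
    simp [PySem.Dict.getD_of_not_contains, PySem.Dict.modify,
      PySem.Dict.insert, PySem.Dict.get?, PySem.Dict.getD, PySem.Dict.contains]

-- A's whole fold, starting from any three-key accumulator
theorem pvFoldA (ds : List (List (String × List String))) (bs ls ss : List String) :
    ds.foldl pvStepA (PySem.Dict.mk [("buses", bs), ("lines", ls), ("switches", ss)])
      = PySem.Dict.mk [("buses", bs ++ ds.flatMap (fun d => pvGetB d "buses")),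
                       ("lines", ls ++ ds.flatMap (fun d => pvGetB d "lines")),
                       ("switches", ss ++ ds.flatMap (fun d => pvGetB d "switches"))] := by
  induction ds generalizing bs ls ss with
  | nil => simp
  | cons d ds ih =>
    simp only [List.foldl_cons, pvStepA_mk, ih, List.flatMap_cons, List.append_assoc]

theorem pvGetD_flat (l : List (List (String × List String))) (k : String)
    (hk : k = "buses" ∨ k = "lines" ∨ k = "switches") :
    (PySem.Dict.mk (pvFlat l)).getD k [] = l.flatMap (fun d => pvGetB d k) := by
  rcases hk with h | h | h <;> subst h <;>
    simp [pvFlat, PySem.Dict.getD, PySem.Dict.get?]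

-- B's recursion computes the canonical form
theorem pvAltFlat (l : List (List (String × List String))) :
    dict_of_elements_to_be_checked_alt l = pvFlat l := by
  fun_induction dict_of_elements_to_be_checked_alt l with
  | case1 => simp [pvFlat]
  | case2 d => simp [pvFlat, List.map]
  | case3 d1 d2 rest l mid ihL ihR =>
    rw [pvMergeB, ihL, ihR]
    simp only [List.map_cons, List.map_nil]
    simp only [pvGetD_flat _ "buses" (Or.inl rfl), pvGetD_flat _ "lines" (Or.inr (Or.inl rfl)),
      pvGetD_flat _ "switches" (Or.inr (Or.inr rfl))]
    have htd : l.take mid ++ l.drop mid = l := List.take_append_drop _ _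
    simp only [pvFlat, ← List.flatMap_append, htd, l]

-- ===== VERDICT =====
theorem dict_of_elements_to_be_checked_spec : Claim_equal_dict_of_elements_to_be_checked := by
  intro l _
  show _ = _
  rw [pvAltFlat]
  unfold dict_of_elements_to_be_checked
  have : PySem.Dict.ofList [("buses", ([] : List String)), ("lines", []), ("switches", [])]
      = PySem.Dict.mk [("buses", []), ("lines", []), ("switches", [])] := by decide
  simp only [this, pvFoldA, List.nil_append]
  rfl
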